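-- pv_equiv track=rewrite | github.com/AdeebaRafi/MIT_Contest | codeforces/cf.py | is_repetitive_unit
-- ===== SOURCE A (Python) =====
-- def is_repetitive_unit(s):
--     # Check if a single unit is repetitive (M followed by one or more IT)
--     if len(s) < 3 or s[0] != 'M':  # Minimum length is 3 (MIT)
--         return False
--     i = 1
--     while i < len(s) - 1:
--         if s[i] != 'I' or s[i + 1] != 'T':
--             return False
--         i += 2
--     return i == len(s)  # Must end exactly after IT pattern
-- ===== SOURCE B (Python) =====
-- def is_repetitive_unit(s):
--     # Compare against the one admissible string of that length: 'M' + 'IT' * k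
--     n = len(s)
--     return n >= 3 and n % 2 == 1 and s == 'M' + 'IT' * ((n - 1) // 2)
-- ===== Notes on version B (the rewrite author's own statement) =====
-- stated objective: simpler
-- what changed: Replaces the index-stepping pair-scan loop with a length/parity guard plus one equality comparison against the unique admissible string of that length, built by string repetition.
import Mathlib
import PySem

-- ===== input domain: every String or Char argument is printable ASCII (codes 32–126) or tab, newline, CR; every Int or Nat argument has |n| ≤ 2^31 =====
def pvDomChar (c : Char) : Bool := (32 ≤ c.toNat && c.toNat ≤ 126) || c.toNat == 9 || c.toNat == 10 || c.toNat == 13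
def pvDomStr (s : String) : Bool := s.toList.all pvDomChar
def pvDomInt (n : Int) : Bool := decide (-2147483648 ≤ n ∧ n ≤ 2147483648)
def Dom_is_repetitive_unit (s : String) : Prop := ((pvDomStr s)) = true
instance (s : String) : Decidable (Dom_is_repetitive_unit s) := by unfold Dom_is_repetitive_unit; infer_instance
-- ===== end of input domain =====

-- B replaces A's index-stepping pair-scan loop with a direct comparison against
-- the constructed expected string 'M' + 'IT'*k (objective: simpler).

-- ===== PORT A =====
-- the while loop of A: i steps by 2, checking s[i]=='I' and s[i+1]=='T'
def isruLoop (l : List Char) (i : Nat) : Bool :=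
  if i < l.length - 1 then
    if l.getD i ' ' ≠ 'I' ∨ l.getD (i + 1) ' ' ≠ 'T' then false
    else isruLoop l (i + 2)
  else i == l.length
termination_by l.length - i
decreasing_by omega

def is_repetitive_unit (s : String) : Bool :=
  let l := s.toList
  if l.length < 3 then false            -- 'len(s) < 3 or s[0] != 'M'' with short-circuit
  else if l.getD 0 ' ' ≠ 'M' then false
  else isruLoop l 1

-- ===== PORT B =====
-- 'IT' * k
def itRep : Nat → List Char
  | 0 => []
  | k + 1 => 'I' :: 'T' :: itRep k

def is_repetitive_unit_alt (s : String) : Bool :=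
  let l := s.toList
  let n := l.length
  decide (3 ≤ n) && (n % 2 == 1) && (l == 'M' :: itRep ((n - 1) / 2))

-- ===== PRECONDITION & SPEC =====
def Spec_is_repetitive_unit (s : String) (out : Bool) : Prop := out = is_repetitive_unit_alt s
instance (s : String) (out : Bool) : Decidable (Spec_is_repetitive_unit s out) := by unfold Spec_is_repetitive_unit; infer_instance

-- ===== CLAIM (what is proved, stated in full; the proofs are below) =====
def Claim_equal_is_repetitive_unit : Prop := ∀ (s : String), Dom_is_repetitive_unit s → Spec_is_repetitive_unit s (is_repetitive_unit s)

-- ===== LEMMAS AND PROOFS =====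

-- structural reformulation of A's loop tail-check
def pairs : List Char → Bool
  | [] => true
  | [_] => false
  | a :: b :: rest => a == 'I' && b == 'T' && pairs rest

theorem isruLoop_eq_pairs (l : List Char) (i : Nat) (h : i ≤ l.length) :
    isruLoop l i = pairs (l.drop i) := by
  rw [isruLoop]
  by_cases hlt : i < l.length - 1
  · have h1 : i < l.length := by omega
    have h2 : i + 1 < l.length := by omega
    rw [List.drop_eq_getElem_cons h1, List.drop_eq_getElem_cons h2]
    have g1 : l.getD i ' ' = l[i] := List.getD_eq_getElem l ' ' h1
    have g2 : l.getD (i + 1) ' ' = l[i + 1] := List.getD_eq_getElem l ' ' h2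
    rw [if_pos hlt, g1, g2]
    by_cases hI : l[i] = 'I'
    · by_cases hT : l[i + 1] = 'T'
      · rw [if_neg (by simp [hI, hT])]
        rw [isruLoop_eq_pairs l (i + 2) (by omega)]
        simp [pairs, hI, hT]
      · rw [if_pos (by simp [hT])]
        simp [pairs, hT]
    · rw [if_pos (by simp [hI])]
      simp [pairs, hI]
  · rw [if_neg hlt]
    have : l.drop i = [] ∨ ∃ a, l.drop i = [a] := by
      rcases Nat.lt_or_ge i l.length with h1 | h1
      · have : i = l.length - 1 := by omega
        right
        refine ⟨l[i], ?_⟩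
        rw [List.drop_eq_getElem_cons h1]
        have hd : l.drop (i + 1) = [] := List.drop_eq_nil_iff.mpr (by omega)
        rw [hd]
      · left; simp [List.drop_eq_nil_iff]; omega
    rcases this with he | ⟨a, he⟩
    · have : i = l.length := by
        have := List.drop_eq_nil_iff.mp he; omega
      simp [pairs, this]
    · have hl : l.length = i + 1 := by
        have := congrArg List.length he
        simp at this; omega
      simp [he, pairs]; omega
termination_by l.length - i
decreasing_by omega

theorem pairs_iff (t : List Char) :
    pairs t = ((t.length % 2 == 0) && (t == itRep (t.length / 2))) := by
  match t with
  | [] => rfl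
  | [a] => simp [pairs, itRep]
  | a :: b :: rest =>
    have ih := pairs_iff rest
    have hlen : (a :: b :: rest).length = rest.length + 2 := by simp
    have hmod : (rest.length + 2) % 2 = rest.length % 2 := by omega
    have hdiv : (rest.length + 2) / 2 = rest.length / 2 + 1 := by omega
    rw [pairs, ih, hlen, hmod, hdiv, itRep]
    cases hA : (a == 'I') <;> cases hB : (b == 'T') <;>
        cases hR : (rest == itRep (rest.length / 2)) <;>
        cases hM2 : (rest.length % 2 == 0) <;>
      simp [List.cons_beq_cons, hA, hB, hR, hM2]

-- ===== VERDICT (by name: the statement is the Claim_ definition above) =====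
theorem is_repetitive_unit_spec : Claim_equal_is_repetitive_unit := by
  intro s _
  unfold Spec_is_repetitive_unit is_repetitive_unit is_repetitive_unit_alt
  set l := s.toList with hl
  by_cases h3 : l.length < 3
  · simp only [if_pos h3]
    have : ¬ (3 ≤ l.length) := by omega
    simp [this]
  · simp only [if_neg h3]
    have h0 : 0 < l.length := by omega
    have g0 : l.getD 0 ' ' = l[0] := List.getD_eq_getElem l ' ' h0
    match hm : l with
    | [] => simp at h0
    | c :: t =>
      by_cases hc : c = 'M'
      · have hM : (c :: t).getD 0 ' ' = 'M' := by simp [hc]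
        rw [if_neg (by simp [hc])]
        rw [isruLoop_eq_pairs (c :: t) 1 (by simp)]
        have hd : (c :: t).drop 1 = t := rfl
        rw [hd, pairs_iff]
        have hlen : (c :: t).length = t.length + 1 := by simp
        have hmod : (t.length + 1) % 2 = 1 ↔ t.length % 2 = 0 := by omega
        have hdiv : (t.length + 1 - 1) / 2 = t.length / 2 := by omega
        simp only [hlen, hdiv]
        have h3' : 3 ≤ t.length + 1 := by simp [hlen] at h3; omega
        by_cases hpar : t.length % 2 = 0
        · simp [hpar, hc, h3', Nat.add_mod]
        · have e1 : (t.length % 2 == 0) = false := by simp; omega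
          have e2 : ((t.length + 1) % 2 == 1) = false := by simp; omega
          rw [e1, e2]; simp
      · rw [if_pos (by simp [hc])]
        simp [hc]
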